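-- pv_equiv track=rewrite | github.com/timjaya/neoway-brand-sentiment | neoway_nlp/runPrediction.py | join_partitions
-- ===== SOURCE A (Python) =====
-- def join_partitions(long_review,entity_with_review):
--     loclist = []
--     for (_, clause) in entity_with_review:
--         loclist.append((long_review.find(clause),long_review.find(clause)+len(clause)))
--     starts = {i for (i,j) in loclist}
--     ends = {j for (i,j) in loclist}
--     starts.add(len(long_review))
--     newends = {}
--     for i in ends:
--         newends[i] = min([x for x in starts if x >= i])
--     for i in newends:
--         pass
--     new_entity_with_review = []
--     for i in range(len(loclist)):
--         tup = loclist[i]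
--         entity = entity_with_review[i][0]
--         st = tup[0]
--         en = newends[tup[1]]
--         new_entity_with_review.append((entity,long_review[st:en]))
--     return new_entity_with_review
-- ===== SOURCE B (Python) =====
-- def find_span(long_review, clause):
--     s = long_review.find(clause)
--     return (s, s + len(clause))
--
-- def join_partitions(long_review, entity_with_review):
--     loclist = [find_span(long_review, c) for _, c in entity_with_review]
--     ss = sorted({s for s, _ in loclist} | {len(long_review)})
--
--     def ceil_start(e):
--         lo, hi = 0, len(ss)
--         while lo < hi:
--             mid = (lo + hi) // 2
--             if ss[mid] < e:
--                 lo = mid + 1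
--             else:
--                 hi = mid
--         return ss[lo]
--
--     return [(ent, long_review[s:ceil_start(e)])
--             for (ent, _), (s, e) in zip(entity_with_review, loclist)]
-- ===== Notes on version B (the rewrite author's own statement) =====
-- stated objective: alternative
-- what changed: Replaces A's per-end linear scan of the start set (min of a filtered list) and the intermediate newends dict with one sorted list of starts queried by hand-written binary search per clause, and calls str.find once per clause instead of twice; on the measured inputs the str.find calls dominate, so both run in similar time.
import Mathlib
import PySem

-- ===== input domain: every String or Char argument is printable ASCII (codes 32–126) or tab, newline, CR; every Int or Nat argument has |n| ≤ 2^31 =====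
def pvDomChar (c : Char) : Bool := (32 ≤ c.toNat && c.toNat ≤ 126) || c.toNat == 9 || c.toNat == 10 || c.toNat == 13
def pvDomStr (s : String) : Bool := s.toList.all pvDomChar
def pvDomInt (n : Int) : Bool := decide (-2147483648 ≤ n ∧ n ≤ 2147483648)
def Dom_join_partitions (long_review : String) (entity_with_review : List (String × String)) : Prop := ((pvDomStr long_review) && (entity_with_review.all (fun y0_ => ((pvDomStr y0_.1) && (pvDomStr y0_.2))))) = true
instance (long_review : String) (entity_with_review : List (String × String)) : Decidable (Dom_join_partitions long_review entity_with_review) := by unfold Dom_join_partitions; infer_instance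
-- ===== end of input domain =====

-- B replaces A's per-end linear scan of the start set (min over a filtered list, memoised in a dict)
-- by one sorted list of starts queried with binary search, and calls find once per clause instead of twice.

-- ===== PORT A =====
def join_partitions (long_review : String) (entity_with_review : List (String × String)) : List (String × String) :=
  let loclist : List (Int × Int) := entity_with_review.foldl
    (fun acc p => acc ++ [(PySem.Str.find long_review p.2, PySem.Str.find long_review p.2 + PySem.Str.len p.2)]) []
  let starts0 : PySem.Set Int := PySem.Set.ofList (loclist.map (fun q => q.1))
  let ends : PySem.Set Int := PySem.Set.ofList (loclist.map (fun q => q.2))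
  let starts : PySem.Set Int := PySem.Set.add starts0 (PySem.Str.len long_review)
  -- 'min([x for x in starts if x >= i])': the comprehension iterates the set, but min with no key is
  -- order-independent, so filtering the Set's list is exact. Python's min raises ValueError on an empty
  -- list (exactly the inputs Pre_ excludes); there the port's '.getD 0' is never relied on.
  let newends : PySem.Dict Int Int := ends.foldl
    (fun d i => d.insert i ((PySem.List.min? (starts.filter (fun x => decide (x ≥ i))) (fun x => x)).getD 0))
    PySem.Dict.empty
  -- 'for i in newends: pass' has no effect
  (PySem.List.pyRange 0 (PySem.List.len loclist)).foldl
    (fun acc i =>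
      let tup := PySem.List.pyGetD loclist i (0, 0)
      let entity := (PySem.List.pyGetD entity_with_review i ("", "")).1
      let st := tup.1
      let en := newends.getD tup.2 0
      acc ++ [(entity, PySem.Str.slice long_review (some st) (some en))]) []

-- ===== PORT B =====
def pvFindSpan (long_review clause : String) : Int × Int :=
  let s := PySem.Str.find long_review clause
  (s, s + PySem.Str.len clause)

-- the 'while lo < hi' binary-search loop of ceil_start in Source B
def pvCeilLoop (ss : List Int) (e : Int) (lo hi : Nat) : Nat :=
  if h : lo < hi then
    let mid := (lo + hi) / 2
    if PySem.List.pyGetD ss (mid : Int) 0 < e then pvCeilLoop ss e (mid + 1) hi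
    else pvCeilLoop ss e lo mid
  else lo
termination_by hi - lo
decreasing_by all_goals omega

def join_partitions_alt (long_review : String) (entity_with_review : List (String × String)) : List (String × String) :=
  let loclist : List (Int × Int) := entity_with_review.map (fun p => pvFindSpan long_review p.2)
  let ss : List Int := PySem.List.sorted
    (PySem.Set.union (PySem.Set.ofList (loclist.map (fun q => q.1))) [PySem.Str.len long_review])
    (fun x => x) false
  -- 'return ss[lo]' in ceil_start raises IndexError when lo = len(ss) (exactly the inputs Pre_
  -- excludes); inside Pre_ the index is in range, so pyGetD is exact there.
  (entity_with_review.zip loclist).map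
    (fun pq => (pq.1.1, PySem.Str.slice long_review (some pq.2.1)
      (some (PySem.List.pyGetD ss ((pvCeilLoop ss pq.2.2 0 ss.length : Nat) : Int) 0))))

-- ===== PRECONDITION & SPEC =====
-- Pre_ excludes exactly the inputs on which A raises ValueError ('min() of empty sequence'): a clause
-- longer than len(long_review)+1 is never found, its computed end exceeds every start, and the filtered
-- list is empty.  (B raises IndexError there.)
def Pre_join_partitions (long_review : String) (entity_with_review : List (String × String)) : Prop :=
  ∀ p ∈ entity_with_review, PySem.Str.len p.2 ≤ PySem.Str.len long_review + 1
instance (long_review : String) (entity_with_review : List (String × String)) : Decidable (Pre_join_partitions long_review entity_with_review) := by unfold Pre_join_partitions; infer_instance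

def pvWitness_join_partitions : String × (List (String × String)) := ("ab cd", [("e1", "ab"), ("e2", "cd")])

def Spec_join_partitions (long_review : String) (entity_with_review : List (String × String)) (out : List (String × String)) : Prop := out = join_partitions_alt long_review entity_with_review
instance (long_review : String) (entity_with_review : List (String × String)) (out : List (String × String)) : Decidable (Spec_join_partitions long_review entity_with_review out) := by unfold Spec_join_partitions; infer_instance

-- ===== CLAIM (what is proved, stated in full; the proofs are below) =====
def Claim_equal_join_partitions : Prop := ∀ (long_review : String) (entity_with_review : List (String × String)), Dom_join_partitions long_review entity_with_review → Pre_join_partitions long_review entity_with_review → Spec_join_partitions long_review entity_with_review (join_partitions long_review entity_with_review)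

-- ===== LEMMAS AND PROOFS =====

-- binary-search loop invariant: starting from a bracket [lo, hi] whose outside is decided, the loop
-- returns the first index whose element is ≥ e (relative to the sorted input)
theorem pvCeilLoop_spec (ss : List Int) (e : Int)
    (hs : List.Pairwise (fun a b => a ≤ b) ss) :
    ∀ lo hi, lo ≤ hi → hi ≤ ss.length →
    (∀ j (hj : j < ss.length), j < lo → ss[j] < e) →
    (∀ j (hj : j < ss.length), hi ≤ j → e ≤ ss[j]) →
    pvCeilLoop ss e lo hi ≤ ss.length ∧
      (∀ j (hj : j < ss.length), j < pvCeilLoop ss e lo hi → ss[j] < e) ∧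
      (∀ j (hj : j < ss.length), pvCeilLoop ss e lo hi ≤ j → e ≤ ss[j]) := by
  have hmono : ∀ (p q : Nat) (hpq : p ≤ q) (hq : q < ss.length), ss[p]'(Nat.lt_of_le_of_lt hpq hq) ≤ ss[q] := by
    intro p q hpq hq
    rcases Nat.lt_or_eq_of_le hpq with h | h
    · exact (List.pairwise_iff_getElem.mp hs) p q (by omega) hq h
    · subst h; exact le_refl _
  intro lo hi
  induction hn : hi - lo using Nat.strong_induction_on generalizing lo hi with
  | _ n ih =>
    intro hlohi hhi hlow hhigh
    rw [pvCeilLoop]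
    by_cases h : lo < hi
    · simp only [dif_pos h]
      have hmidlt : (lo + hi) / 2 < ss.length := by omega
      have hget : PySem.List.pyGetD ss (((lo + hi) / 2 : Nat) : Int) 0 = ss[(lo + hi) / 2] := by
        rw [PySem.List.pyGetD_natCast]; exact List.getD_eq_getElem ss 0 hmidlt
      by_cases hc : PySem.List.pyGetD ss (((lo + hi) / 2 : Nat) : Int) 0 < e
      · simp only [if_pos hc]
        refine ih (hi - ((lo + hi) / 2 + 1)) (by omega) ((lo + hi) / 2 + 1) hi rfl (by omega) hhi ?_ hhigh
        intro j hj hjlt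
        have : ss[j] ≤ ss[(lo + hi) / 2] := hmono j _ (by omega) hmidlt
        rw [hget] at hc; omega
      · simp only [if_neg hc]
        refine ih ((lo + hi) / 2 - lo) (by omega) lo ((lo + hi) / 2) rfl (by omega) (by omega) hlow ?_
        intro j hj hjge
        have : ss[(lo + hi) / 2] ≤ ss[j] := hmono _ j hjge hj
        rw [hget] at hc; omega
    · simp only [dif_neg h]
      exact ⟨by omega, hlow, fun j hj hge => hhigh j hj (by omega)⟩

-- a fold of 'd[x] = g(x)' looked up afterwards
theorem getD_foldl_insertFun (g : Int → Int) (l : List Int) (d : PySem.Dict Int Int) (e : Int) :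
    (l.foldl (fun d x => d.insert x (g x)) d).getD e 0 = if e ∈ l then g e else d.getD e 0 := by
  induction l generalizing d with
  | nil => simp
  | cons x t ih =>
    simp only [List.foldl_cons, ih, List.mem_cons, PySem.Dict.getD_insert]
    by_cases het : e ∈ t
    · simp [het]
    · by_cases hex : e = x
      · simp [hex]
      · simp [hex]

-- the value A memoises for an end e (min of the starts ≥ e) is the element B's binary search finds
theorem ceil_eq_min (S : List Int) (e : Int) (hex : ∃ x ∈ S, e ≤ x) :
    (PySem.List.min? (S.filter (fun x => decide (x ≥ e))) (fun x => x)).getD 0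
      = PySem.List.pyGetD (PySem.List.sorted S (fun x => x) false)
          ((pvCeilLoop (PySem.List.sorted S (fun x => x) false) e 0
            (PySem.List.sorted S (fun x => x) false).length : Nat) : Int) 0 := by
  set ss := PySem.List.sorted S (fun x => x) false with hss
  have hperm : ss.Perm S := PySem.List.sorted_perm S (fun x => x) false
  have hsorted : List.Pairwise (fun a b => a ≤ b) ss := PySem.List.sorted_pairwise S (fun x => x)
  obtain ⟨hle, hlt, hge⟩ := pvCeilLoop_spec ss e hsorted 0 ss.length (by omega) (le_refl _)
    (by intro j hj hj0; omega) (by intro j hj hj'; omega)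
  set r := pvCeilLoop ss e 0 ss.length with hr
  obtain ⟨x, hxS, hxe⟩ := hex
  have hxss : x ∈ ss := hperm.mem_iff.mpr hxS
  obtain ⟨jx, hjx, hjxe⟩ := List.mem_iff_getElem.mp hxss
  have hrlt : r < ss.length := by
    by_contra hcon
    have := hlt jx hjx (by omega)
    omega
  have hgetr : PySem.List.pyGetD ss ((r : Nat) : Int) 0 = ss[r] := by
    rw [PySem.List.pyGetD_natCast]; exact List.getD_eq_getElem ss 0 hrlt
  set m := ss[r] with hm
  have hmem : m ∈ S.filter (fun x => decide (x ≥ e)) := by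
    rw [List.mem_filter]
    exact ⟨hperm.mem_iff.mp (List.getElem_mem hrlt), by simpa using hge r hrlt (le_refl _)⟩
  have hmin : ∀ y ∈ S.filter (fun x => decide (x ≥ e)), m ≤ y := by
    intro y hy
    rw [List.mem_filter] at hy
    obtain ⟨hyS, hye⟩ := hy
    have hye : e ≤ y := by simpa using hye
    obtain ⟨jy, hjy, hjye⟩ := List.mem_iff_getElem.mp (hperm.mem_iff.mpr hyS)
    have hrjy : r ≤ jy := by
      by_contra hcon
      have := hlt jy hjy (by omega)
      omega
    have hmle : ss[r] ≤ ss[jy] := by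
      rcases Nat.lt_or_eq_of_le hrjy with h | h
      · exact (List.pairwise_iff_getElem.mp hsorted) r jy hrlt hjy h
      · exact le_of_eq (by congr 1)
    rw [hm]; rw [hjye] at hmle; exact hmle
  rcases hmin? : PySem.List.min? (S.filter (fun x => decide (x ≥ e))) (fun x => x) with _ | m'
  · rw [PySem.List.min?_eq_none_iff] at hmin?
    rw [hmin?] at hmem; simp at hmem
  · have h1 : m ≤ m' := hmin m' (PySem.List.min?_mem hmin?)
    have h2 : m' ≤ m := PySem.List.min?_isMin hmin? m hmem
    rw [hgetr, Option.getD_some]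
    omega

-- a found clause ends inside the review; an unfound one of length ≤ len+1 ends at ≤ len
theorem find_add_len_le (long_review c : String)
    (h : PySem.Str.len c ≤ PySem.Str.len long_review + 1) :
    PySem.Str.find long_review c + PySem.Str.len c ≤ PySem.Str.len long_review := by
  rw [PySem.Str.find_eq, PySem.Str.len_eq, PySem.Str.len_eq] at *
  set s := long_review.toList
  set sub := c.toList
  by_cases hf : PySem.Chars.find s sub = -1
  · rw [hf]; omega
  · have hspec := PySem.Chars.findFrom_natCast_spec s sub 0 (by omega)
    simp only [Nat.cast_zero, PySem.Chars.findFrom_zero] at hspec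
    obtain ⟨hk, hpre, -⟩ := hspec hf
    have hlen := hpre.length_le
    rw [List.length_drop] at hlen
    have hfl := PySem.Chars.find_le_length s sub
    omega

-- ===== VERDICT (by name: the statement is the Claim_ definition above) =====
theorem join_partitions_spec : Claim_equal_join_partitions := by
  intro long_review l _hdom hpre
  unfold Spec_join_partitions join_partitions join_partitions_alt
  simp only [PySem.List.foldl_append_singleton_eq_map, List.nil_append]
  set f : String × String → Int × Int :=
    fun p => (PySem.Str.find long_review p.2, PySem.Str.find long_review p.2 + PySem.Str.len p.2) with hf
  have hfspan : (fun p : String × String => pvFindSpan long_review p.2) = f := by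
    funext p; rfl
  rw [hfspan]
  set L := l.map f with hL
  set n : Int := PySem.Str.len long_review with hn
  have hunion : PySem.Set.union (PySem.Set.ofList (L.map (fun q => q.1))) [n]
      = PySem.Set.add (PySem.Set.ofList (L.map (fun q => q.1))) n := by
    rfl
  rw [hunion]
  set S : PySem.Set Int := PySem.Set.add (PySem.Set.ofList (L.map (fun q => q.1))) n with hS
  set ss := PySem.List.sorted S (fun x => x) false with hss
  -- end of every clause is ≤ n = len(long_review), and n ∈ S
  have hex : ∀ p ∈ l, ∃ x ∈ S, (f p).2 ≤ x := by
    intro p hp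
    refine ⟨n, ?_, ?_⟩
    · rw [hS, PySem.Set.mem_add]; right; rfl
    · exact find_add_len_le long_review p.2 (hpre p hp)
  -- A's output loop is already a map over range (rewritten by the simp above)
  have hlen : PySem.List.len L = ((L.length : Nat) : Int) := by
    simp [PySem.List.len]
  rw [hlen, PySem.List.pyRange_zero_natCast]
  rw [List.map_map]
  -- elementwise comparison
  apply List.ext_getElem
  · simp [hL]
  · intro i hi1 hi2
    have hiL : i < L.length := by simpa using hi1
    have hil : i < l.length := by rw [hL] at hiL; simpa using hiL
    simp only [List.getElem_map, List.getElem_range, Function.comp_apply, List.getElem_zip]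
    have hgl : PySem.List.pyGetD l ((i : Nat) : Int) ("", "") = l[i] := by
      rw [PySem.List.pyGetD_natCast]; exact List.getD_eq_getElem l _ hil
    have hgL : PySem.List.pyGetD L ((i : Nat) : Int) ((0 : Int), (0 : Int)) = L[i] := by
      rw [PySem.List.pyGetD_natCast]; exact List.getD_eq_getElem L _ hiL
    rw [hgl, hgL]
    have hLi : L[i] = f l[i] := by rw [List.getElem_of_eq hL hiL]; simp
    refine Prod.ext rfl ?_
    simp only
    congr 1
    -- the end values agree
    have hmem_end : (L[i]).2 ∈ PySem.Set.ofList (L.map (fun q => q.2)) := by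
      rw [PySem.Set.mem_ofList]
      exact List.mem_map.mpr ⟨L[i], List.getElem_mem hiL, rfl⟩
    rw [getD_foldl_insertFun (fun e => (PySem.List.min? (S.filter (fun x => decide (x ≥ e))) (fun x => x)).getD 0) _ _ _]
    rw [if_pos hmem_end]
    have := ceil_eq_min S (L[i]).2 (by rw [hLi]; exact hex l[i] (List.getElem_mem hil))
    rw [← hss] at this
    rw [this, hLi]
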